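-- pv_equiv track=rewrite | github.com/casp24kom/governed-ai-platform | app/config.py | _split_fqn
-- ===== SOURCE A (Python) =====
-- def _split_fqn(value: str) -> tuple[str, str, str]:
--     """
--     Split OBJECT names like DB.SCHEMA.NAME.
--     Returns empty strings when parts are missing.
--     """
--     parts = [p.strip() for p in (value or "").split(".") if p.strip()]
--     if len(parts) >= 3:
--         return parts[-3], parts[-2], parts[-1]
--     if len(parts) == 2:
--         return "", parts[0], parts[1]
--     if len(parts) == 1:
--         return "", "", parts[0]
--     return "", "", ""
-- ===== SOURCE B (Python) =====
-- def _split_fqn(value: str) -> tuple[str, str, str]: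
--     # Single left-to-right character scan: no split(), no parts list.
--     # A rolling window (a, b, c) keeps the last three non-empty stripped
--     # components seen so far; a trailing '.' sentinel flushes the final token.
--     a = b = c = ""
--     cur = []
--     for ch in (value or "") + ".":
--         if ch == ".":
--             tok = "".join(cur).strip()
--             cur = []
--             if tok:
--                 a, b, c = b, c, tok
--         else:
--             cur.append(ch)
--     return a, b, c
-- ===== Notes on version B (the rewrite author's own statement) =====
-- stated objective: alternative
-- what changed: Replaces split()+strip/filter list building plus a four-branch length cascade by a single character-level scan that maintains a rolling window of the last three non-empty stripped components, flushed by a sentinel dot.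
import Mathlib
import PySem

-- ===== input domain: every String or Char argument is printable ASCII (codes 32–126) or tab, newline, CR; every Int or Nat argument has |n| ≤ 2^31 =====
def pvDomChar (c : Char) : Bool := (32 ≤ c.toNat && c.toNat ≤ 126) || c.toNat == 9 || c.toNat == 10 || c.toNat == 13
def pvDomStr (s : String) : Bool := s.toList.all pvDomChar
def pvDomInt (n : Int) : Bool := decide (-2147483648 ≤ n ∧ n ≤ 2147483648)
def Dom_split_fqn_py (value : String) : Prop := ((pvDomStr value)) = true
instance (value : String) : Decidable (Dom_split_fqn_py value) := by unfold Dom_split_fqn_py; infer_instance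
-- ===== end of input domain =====

-- B replaces split()+filter list building and the four-branch length cascade by one
-- character-level scan keeping a rolling window of the last three non-empty stripped
-- components (objective: alternative, same cost).

-- ===== PORT A =====
def split_fqn_py (value : String) : String × String × String :=
  let v := if value = "" then "" else value   -- (value or "")
  let parts := (((PySem.Str.split? v ".").getD []).map (fun p => PySem.Str.strip p)).filter (fun p => decide (p ≠ ""))
  if parts.length ≥ 3 then
    (PySem.List.pyGetD parts (-3) "", PySem.List.pyGetD parts (-2) "", PySem.List.pyGetD parts (-1) "")
  else if parts.length = 2 then
    ("", PySem.List.pyGetD parts 0 "", PySem.List.pyGetD parts 1 "")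
  else if parts.length = 1 then
    ("", "", PySem.List.pyGetD parts 0 "")
  else
    ("", "", "")

-- ===== PORT B =====
-- one fold over the characters of (value or "") plus a sentinel '.'; state =
-- (rolling window (a,b,c), current token's characters cur)
def split_fqn_py_alt_step (st : (String × String × String) × List Char) (ch : Char) :
    (String × String × String) × List Char :=
  if ch = '.' then
    let tok := PySem.Str.strip (String.ofList st.2)   -- "".join(cur).strip()
    if tok ≠ "" then ((st.1.2.1, st.1.2.2, tok), []) else (st.1, [])
  else (st.1, st.2 ++ [ch])

def split_fqn_py_alt (value : String) : String × String × String :=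
  let v := if value = "" then "" else value   -- (value or "")
  (List.foldl split_fqn_py_alt_step ((("", "", ""), [])) (v.toList ++ ['.'])).1

-- ===== PRECONDITION & SPEC =====
def Spec_split_fqn_py (value : String) (out : String × String × String) : Prop := out = split_fqn_py_alt value
instance (value : String) (out : String × String × String) : Decidable (Spec_split_fqn_py value out) := by unfold Spec_split_fqn_py; infer_instance

-- ===== CLAIM (what is proved, stated in full; the proofs are below) =====
def Claim_equal_split_fqn_py : Prop := ∀ (value : String), Dom_split_fqn_py value → Spec_split_fqn_py value (split_fqn_py value)

-- ===== LEMMAS AND PROOFS =====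

-- simple structural splitter at '.', specification for PySem.Chars.splitOn with sep = "."
def splitChar : List Char → List (List Char)
  | [] => [[]]
  | c :: l =>
    if c = '.' then [] :: splitChar l
    else match splitChar l with
      | [] => [[c]]
      | h :: t => (c :: h) :: t

def consHead (c : List Char) : List (List Char) → List (List Char)
  | [] => [c]
  | h :: t => (c ++ h) :: t

theorem splitChar_ne_nil (l : List Char) : splitChar l ≠ [] := by
  induction l with
  | nil => simp [splitChar]
  | cons c l ih =>
    simp only [splitChar]
    split
    · simp
    · cases h : splitChar l <;> simp

theorem splitOn_go_eq : ∀ (fuel : ℕ) (l cur : List Char) (acc : List (List Char)),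
    l.length ≤ fuel →
    PySem.Chars.splitOn.go ['.'] fuel l cur acc = acc.reverse ++ consHead cur.reverse (splitChar l) := by
  intro fuel
  induction fuel with
  | zero =>
    intro l cur acc h
    have : l = [] := List.eq_nil_of_length_eq_zero (Nat.le_zero.mp h)
    subst this
    simp [PySem.Chars.splitOn.go, splitChar, consHead]
  | succ fuel ih =>
    intro l cur acc h
    cases l with
    | nil => simp [PySem.Chars.splitOn.go, splitChar, consHead]
    | cons c rest =>
      by_cases hc : c = '.'
      · subst hc
        rw [show PySem.Chars.splitOn.go ['.'] (fuel+1) ('.' :: rest) cur acc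
              = PySem.Chars.splitOn.go ['.'] fuel rest [] (cur.reverse :: acc) from by
            simp [PySem.Chars.splitOn.go, List.isPrefixOf]]
        rw [ih rest [] (cur.reverse :: acc) (by simpa using Nat.lt_succ_iff.mp (by simpa using h))]
        simp [splitChar]
        cases hs : splitChar rest with
        | nil => exact absurd hs (splitChar_ne_nil rest)
        | cons h t => simp [consHead]
      · rw [show PySem.Chars.splitOn.go ['.'] (fuel+1) (c :: rest) cur acc
              = PySem.Chars.splitOn.go ['.'] fuel rest (c :: cur) acc from by
            simp only [PySem.Chars.splitOn.go]
            rw [show (['.'].isPrefixOf (c :: rest)) = false from by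
              simp [List.isPrefixOf]; intro h; exact absurd h.symm hc]
            simp]
        rw [ih rest (c :: cur) acc (by simpa using Nat.lt_succ_iff.mp (by simpa using h))]
        simp only [splitChar, if_neg hc]
        cases hs : splitChar rest with
        | nil => exact absurd hs (splitChar_ne_nil rest)
        | cons h t => simp [consHead]

theorem splitOn_eq (s : List Char) : PySem.Chars.splitOn s ['.'] = splitChar s := by
  rw [PySem.Chars.splitOn, splitOn_go_eq (s.length + 1) s [] [] (by omega)]
  cases hs : splitChar s with
  | nil => exact absurd hs (splitChar_ne_nil s)
  | cons h t => simp [consHead]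

theorem splitChar_no_dot (u : List Char) (h : '.' ∉ u) : splitChar u = [u] := by
  induction u with
  | nil => simp [splitChar]
  | cons c l ih =>
    simp only [List.mem_cons, not_or] at h
    simp [splitChar, Ne.symm h.1, ih h.2]

theorem splitChar_append_dot (u w : List Char) (h : '.' ∉ u) :
    splitChar (u ++ '.' :: w) = u :: splitChar w := by
  induction u with
  | nil => simp [splitChar]
  | cons c l ih =>
    simp only [List.mem_cons, not_or] at h
    simp [splitChar, Ne.symm h.1, ih h.2]

-- the rolling-window update
def roll (t : String × String × String) (tok : String) : String × String × String :=
  (t.2.1, t.2.2, tok)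

-- tokens of a character list: split at '.', strip, keep the non-empty ones
def toks (cs : List Char) : List String :=
  ((splitChar cs).map (fun p => String.ofList (PySem.Chars.strip p))).filter (fun p => decide (p ≠ ""))

theorem strip_ofList (cur : List Char) :
    PySem.Str.strip (String.ofList cur) = String.ofList (PySem.Chars.strip cur) := by
  apply String.toList_injective
  simp [PySem.Str.toList_strip]

theorem fold_eq : ∀ (l cur : List Char) (t : String × String × String), '.' ∉ cur →
    (List.foldl split_fqn_py_alt_step (t, cur) (l ++ ['.'])).1 =
      List.foldl roll t (toks (cur ++ l)) := by
  intro l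
  induction l with
  | nil =>
    intro cur t h
    simp only [List.nil_append, List.append_nil, List.foldl_cons, List.foldl_nil]
    simp only [split_fqn_py_alt_step, reduceIte, strip_ofList]
    simp only [toks, splitChar_no_dot cur h, List.map_cons, List.map_nil]
    by_cases hne : String.ofList (PySem.Chars.strip cur) = ""
    · simp [hne, List.filter]
    · simp [hne, List.filter, roll]
  | cons x l ih =>
    intro cur t h
    by_cases hx : x = '.'
    · subst hx
      simp only [List.cons_append, List.foldl_cons]
      have hstep : split_fqn_py_alt_step (t, cur) '.' =
          ((if String.ofList (PySem.Chars.strip cur) ≠ "" then roll t (String.ofList (PySem.Chars.strip cur)) else t),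
            ([] : List Char)) := by
        simp only [split_fqn_py_alt_step, reduceIte, strip_ofList, roll]
        split_ifs <;> rfl
      rw [hstep, ih [] _ (by simp)]
      simp only [toks, splitChar_append_dot cur l h, List.map_cons, List.nil_append]
      by_cases hne : String.ofList (PySem.Chars.strip cur) = ""
      · simp [hne, List.filter]
      · simp [hne, List.filter]
    · simp only [List.cons_append, List.foldl_cons]
      rw [show split_fqn_py_alt_step (t, cur) x = (t, cur ++ [x]) from by
        simp [split_fqn_py_alt_step, hx]]
      rw [ih (cur ++ [x]) t (by
        simp only [List.mem_append, List.mem_singleton, not_or]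
        exact ⟨h, fun hc => hx hc.symm⟩)]
      simp

-- the rolling fold computes the last three elements of the padded list
theorem foldl_roll_eq (l : List String) : ∀ (a b c : String),
    List.foldl roll (a, b, c) l =
      (((a :: b :: c :: l).reverse).getD 2 "", ((a :: b :: c :: l).reverse).getD 1 "",
        ((a :: b :: c :: l).reverse).getD 0 "") := by
  induction l with
  | nil => intro a b c; simp [List.foldl, List.getD]
  | cons x l ih =>
    intro a b c
    simp only [List.foldl_cons]
    rw [show roll (a, b, c) x = (b, c, x) from rfl, ih b c x]
    have key : ∀ i : ℕ, i < 3 →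
        ((b :: c :: x :: l).reverse).getD i "" = ((a :: b :: c :: x :: l).reverse).getD i "" := by
      intro i hi
      have h1 : (a :: b :: c :: x :: l).reverse = (b :: c :: x :: l).reverse ++ [a] := by simp
      rw [h1]
      rw [List.getD_append _ _ _ _ (by simp; omega)]
    rw [key 0 (by omega), key 1 (by omega), key 2 (by omega)]

-- A's branch cascade equals the rolling fold from ("","","")
theorem branch_eq_roll (l : List String) :
    (if l.length ≥ 3 then
       (PySem.List.pyGetD l (-3) "", PySem.List.pyGetD l (-2) "", PySem.List.pyGetD l (-1) "")
     else if l.length = 2 then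
       ("", PySem.List.pyGetD l 0 "", PySem.List.pyGetD l 1 "")
     else if l.length = 1 then
       ("", "", PySem.List.pyGetD l 0 "")
     else ("", "", "")) = List.foldl roll ("", "", "") l := by
  rw [foldl_roll_eq]
  match l with
  | [] => simp [List.getD]
  | [a] => simp [PySem.List.pyGetD, PySem.List.pyGet?, PySem.List.pyIdx?, List.getD]
  | [a, b] => simp [PySem.List.pyGetD, PySem.List.pyGet?, PySem.List.pyIdx?, List.getD]
  | a :: b :: c :: rest =>
    rw [if_pos (by simp)]
    rw [PySem.List.pyGetD_neg_ofNat _ 3 _ (by omega) (by simp),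
        PySem.List.pyGetD_neg_ofNat _ 2 _ (by omega) (by simp),
        PySem.List.pyGetD_neg_ofNat _ 1 _ (by omega) (by simp)]
    have hrev : ("" :: "" :: "" :: a :: b :: c :: rest).reverse
        = (a :: b :: c :: rest).reverse ++ ["", "", ""] := by simp
    rw [hrev]
    have hlen : (a :: b :: c :: rest).reverse.length = rest.length + 3 := by simp
    rw [List.getD_append _ _ _ _ (by omega), List.getD_append _ _ _ _ (by omega),
        List.getD_append _ _ _ _ (by omega)]
    have hget : ∀ i : ℕ, i < rest.length + 3 →
        (a :: b :: c :: rest).reverse.getD i "" = (a :: b :: c :: rest).getD (rest.length + 2 - i) "" := by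
      intro i hi
      rw [List.getD_eq_getElem?_getD, List.getD_eq_getElem?_getD,
          List.getElem?_reverse (by simp only [List.length_cons]; omega)]
      have hix : (a :: b :: c :: rest).length - 1 - i = rest.length + 2 - i := by
        simp only [List.length_cons]; omega
      rw [hix]
    rw [hget 0 (by omega), hget 1 (by omega), hget 2 (by omega)]
    simp only [List.getD_eq_getElem?_getD, List.length_cons]
    rw [List.getElem?_eq_getElem (by simp only [List.length_cons]; omega),
        List.getElem?_eq_getElem (by simp only [List.length_cons]; omega),
        List.getElem?_eq_getElem (by simp only [List.length_cons]; omega)]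
    simp only [Option.getD_some]
    refine congrArg₂ Prod.mk ?_ (congrArg₂ Prod.mk ?_ ?_) <;> exact getElem_congr_idx (by omega)

theorem parts_eq_toks (v : String) :
    (((PySem.Str.split? v ".").getD []).map (fun p => PySem.Str.strip p)).filter
        (fun p => decide (p ≠ "")) = toks v.toList := by
  have hc : PySem.Chars.split? v.toList ".".toList = some (splitChar v.toList) := by
    simp only [PySem.Chars.split?]
    rw [if_neg (by simp [List.isEmpty])]
    exact congrArg some (splitOn_eq v.toList)
  have hb := PySem.Str.split?_map v "."
  rw [hc] at hb
  cases hsp : PySem.Str.split? v "." with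
  | none => rw [hsp] at hb; simp at hb
  | some l =>
    rw [hsp] at hb
    simp only [Option.map_some, Option.some_inj] at hb
    have hl : l = (splitChar v.toList).map String.ofList := by
      rw [← hb, List.map_map]
      symm
      calc List.map (String.ofList ∘ String.toList) l = List.map id l :=
            List.map_congr_left (fun x _ => by simp)
        _ = l := List.map_id l
    subst hl
    simp only [Option.getD_some, toks, List.map_map]
    congr 1
    ext p
    simp [Function.comp, strip_ofList]

theorem split_fqn_py_spec : Claim_equal_split_fqn_py := by
  intro value _
  unfold Spec_split_fqn_py split_fqn_py split_fqn_py_alt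
  simp only []
  rw [parts_eq_toks, branch_eq_roll]
  rw [fold_eq _ [] _ (by simp)]
  simp
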